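-- pv_equiv track=rewrite | github.com/lewis6991/make-ls | src/make_ls/analysis/diagnostics/common.py | strip_make_comment
-- ===== SOURCE A (Python) =====
-- def strip_make_comment(text: str) -> str:
--     escaped = False
--     for index, character in enumerate(text):
--         if escaped:
--             escaped = False
--             continue
--         if character == '\\':
--             escaped = True
--             continue
--         if character == '#':
--             return text[:index]
--     return text
-- ===== SOURCE B (Python) =====
-- def strip_make_comment(text: str) -> str:
--     # Pair-consuming tokenizer: build the kept prefix directly, eating a
--     # backslash together with the character it escapes in one step.
--     out = []
--     it = iter(text)
--     for ch in it:
--         if ch == '#':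
--             break
--         out.append(ch)
--         if ch == '\\':
--             out.append(next(it, ''))
--     return ''.join(out)
-- ===== Notes on version B (the rewrite author's own statement) =====
-- stated objective: alternative
-- what changed: Replaces the index/escape-flag state machine that slices the input with a pair-consuming tokenizer that builds the kept prefix directly, eating each backslash together with the character it escapes in one step.
import Mathlib
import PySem

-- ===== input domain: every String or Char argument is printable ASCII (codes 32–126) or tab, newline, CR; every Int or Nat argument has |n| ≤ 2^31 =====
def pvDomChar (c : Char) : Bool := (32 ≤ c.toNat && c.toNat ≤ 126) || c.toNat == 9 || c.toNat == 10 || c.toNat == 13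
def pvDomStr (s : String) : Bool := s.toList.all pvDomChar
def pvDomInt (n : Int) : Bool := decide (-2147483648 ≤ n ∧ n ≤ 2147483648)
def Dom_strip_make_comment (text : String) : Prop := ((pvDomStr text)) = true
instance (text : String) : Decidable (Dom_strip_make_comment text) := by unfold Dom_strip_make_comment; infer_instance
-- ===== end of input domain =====

-- ===== PORT A =====
-- B changes the algorithm: A is an index/escape-flag scan that slices the input;
-- B is a pair-consuming tokenizer building the kept prefix directly (objective: alternative).
def pvAGo (full : String) (s : List Char) (idx : Nat) (escaped : Bool) : String :=
  match s, escaped with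
  | [], _ => full
  | _ :: rest, true => pvAGo full rest (idx + 1) false
  | c :: rest, false =>
    if c = '\\' then pvAGo full rest (idx + 1) true
    else if c = '#' then PySem.Str.slice full none (some (idx : Int))
    else pvAGo full rest (idx + 1) false

def strip_make_comment (text : String) : String := pvAGo text text.toList 0 false

-- ===== PORT B =====
def pvBGo : List Char → List Char
  | [] => []
  | c :: rest =>
    if c = '#' then []
    else if c = '\\' then
      match rest with
      | [] => [c]
      | d :: rest' => c :: d :: pvBGo rest'
    else c :: pvBGo rest

def strip_make_comment_alt (text : String) : String := String.ofList (pvBGo text.toList)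

-- ===== PRECONDITION & SPEC =====
def Spec_strip_make_comment (text : String) (out : String) : Prop := out = strip_make_comment_alt text
instance (text : String) (out : String) : Decidable (Spec_strip_make_comment text out) := by unfold Spec_strip_make_comment; infer_instance

-- ===== CLAIM (what is proved, stated in full; the proofs are below) =====
def Claim_equal_strip_make_comment : Prop := ∀ (text : String), Dom_strip_make_comment text → Spec_strip_make_comment text (strip_make_comment text)

-- ===== LEMMAS AND PROOFS =====
theorem pvKey (rest pre : List Char) (full : String) (hfull : full.toList = pre ++ rest) :
    pvAGo full rest pre.length false = String.ofList (pre ++ pvBGo rest) := by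
  induction rest using pvBGo.induct generalizing pre with
  | case1 =>
      apply String.toList_injective
      simp [pvBGo, pvAGo, hfull]
  | case2 rest' =>
      have hb : pvBGo ('#' :: rest') = [] := by rw [pvBGo.eq_def]; simp
      apply String.toList_injective
      simp [hb, pvAGo, PySem.Str.toList_slice, PySem.List.slice_to_natCast, hfull]
  | case3 h =>
      apply String.toList_injective
      simp [pvBGo, pvAGo, h, hfull]
  | case4 d rest' h ih =>
      have hb : pvBGo ('\\' :: d :: rest') = '\\' :: d :: pvBGo rest' := by
        rw [pvBGo.eq_def]; simp
      have := ih (pre ++ ['\\', d]) (by simpa using hfull)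
      simp [hb, pvAGo] at this ⊢
      simpa [List.append_assoc] using this
  | case5 d rest' h1 h2 ih =>
      have hb : pvBGo (d :: rest') = d :: pvBGo rest' := by
        rw [pvBGo.eq_def]; simp [h1, h2]
      have := ih (pre ++ [d]) (by simpa using hfull)
      simp [hb, pvAGo, h1, h2] at this ⊢
      simpa [List.append_assoc] using this

-- ===== VERDICT (by name: the statement is the Claim_ definition above) =====
theorem strip_make_comment_spec : Claim_equal_strip_make_comment := by
  intro text _
  unfold Spec_strip_make_comment strip_make_comment strip_make_comment_alt
  simpa using pvKey text.toList [] text rfl
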